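-- pv_equiv track=rewrite | github.com/daniel-reich/ubiquitous-fiesta | bd2fLqAxHfGTx86Qx_8.py | can_complete
-- ===== SOURCE A (Python) =====
-- def can_complete(initial, word):
--   start=0
--   for l in initial:
--     if l in word[start:] and initial.count(l)<=word.count(l):
--       start=word.find(l,start)
--     else:
--       return False
--   return True
-- ===== SOURCE B (Python) =====
-- def can_complete(initial, word):
--     wc = {}
--     for ch in word:
--         wc[ch] = wc.get(ch, 0) + 1
--     pos = {}
--     for i, ch in enumerate(word):
--         pos.setdefault(ch, []).append(i)
--     ic = {}
--     for ch in initial: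
--         ic[ch] = ic.get(ch, 0) + 1
--     start = 0
--     for c in initial:
--         if wc.get(c, 0) < ic[c]:
--             return False
--         idxs = pos.get(c, [])
--         if not idxs:
--             return False
--         if idxs[-1] < start:
--             return False
--         lo, hi = 0, len(idxs)
--         while lo < hi:
--             mid = (lo + hi) // 2
--             if idxs[mid] < start:
--                 lo = mid + 1
--             else:
--                 hi = mid
--         start = idxs[lo]
--     return True
-- ===== Notes on version B (the rewrite author's own statement) =====
-- stated objective: faster
-- what changed: Replaced A's per-character string scans (slice membership, two .count calls and .find per letter, O(n*m)) by counters and per-character sorted occurrence-index lists built once, with a hand-rolled binary search (bisect_left) to find the first occurrence >= start.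
import Mathlib
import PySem

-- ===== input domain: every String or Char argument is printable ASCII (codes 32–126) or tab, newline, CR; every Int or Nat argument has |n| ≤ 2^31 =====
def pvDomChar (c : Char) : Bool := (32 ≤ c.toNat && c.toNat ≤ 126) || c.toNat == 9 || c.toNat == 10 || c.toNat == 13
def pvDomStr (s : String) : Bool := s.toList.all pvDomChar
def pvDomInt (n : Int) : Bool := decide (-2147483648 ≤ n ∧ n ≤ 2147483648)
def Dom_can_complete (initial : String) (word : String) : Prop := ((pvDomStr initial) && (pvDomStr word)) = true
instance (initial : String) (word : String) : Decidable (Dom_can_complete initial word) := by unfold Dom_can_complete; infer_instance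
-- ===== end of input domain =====

-- B replaces A's per-letter string scans (slice membership, two .count calls and .find) by
-- counters and per-character occurrence-index lists built once, plus a binary search; objective: faster.

-- ===== PORT A =====
-- the 'for l in initial' loop of A, with state 'start'
def canAGo (ini w : List Char) : List Char → Int → Bool
  | [], _ => true
  | l :: rest, start =>
    if PySem.Chars.isIn [l] (PySem.List.slice w (some start) none)
        && decide (PySem.Chars.count ini [l] ≤ PySem.Chars.count w [l]) then
      canAGo ini w rest (PySem.Chars.findFrom w [l] start)
    else false

def can_complete (initial : String) (word : String) : Bool :=
  canAGo initial.toList word.toList initial.toList 0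

-- ===== PORT B =====
-- the hand-written 'while lo < hi' binary search of Source B; fuel = hi - lo iterations always suffice
def pvBsearch (idxs : List Int) (start : Int) : Nat → Nat → Nat → Nat
  | 0, lo, _hi => lo
  | Nat.succ fuel, lo, hi =>
    if lo < hi then
      let mid := (lo + hi) / 2
      if (PySem.List.pyGet? idxs (mid : Int)).getD 0 < start then
        pvBsearch idxs start fuel (mid + 1) hi
      else
        pvBsearch idxs start fuel lo mid
    else lo

-- the 'for c in initial' loop of Source B, with state 'start'
def canBGo (ic wc : PySem.Dict Char Int) (posd : PySem.Dict Char (List Int)) : List Char → Int → Bool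
  | [], _ => true
  | c :: rest, start =>
    if wc.getD c 0 < ic.getD c 0 then false
    else
      let idxs := posd.getD c []
      if idxs.isEmpty then false
      -- idxs ≠ [] below, so pyGet? idxs (-1) is some; the .getD default is never read
      else if (PySem.List.pyGet? idxs (-1)).getD 0 < start then false
      else
        canBGo ic wc posd rest
          ((PySem.List.pyGet? idxs ((pvBsearch idxs start idxs.length 0 idxs.length : Nat) : Int)).getD 0)

def can_complete_alt (initial : String) (word : String) : Bool :=
  let wc := word.toList.foldl (fun d ch => d.insert ch (d.getD ch 0 + 1)) PySem.Dict.empty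
  let posd := (PySem.List.enumerate word.toList 0).foldl
      (fun d p => d.modify p.2 [] (fun v => v ++ [p.1])) PySem.Dict.empty
  let ic := initial.toList.foldl (fun d ch => d.insert ch (d.getD ch 0 + 1)) PySem.Dict.empty
  canBGo ic wc posd initial.toList 0

-- ===== PRECONDITION & SPEC =====
def Spec_can_complete (initial : String) (word : String) (out : Bool) : Prop := out = can_complete_alt initial word
instance (initial : String) (word : String) (out : Bool) : Decidable (Spec_can_complete initial word out) := by unfold Spec_can_complete; infer_instance

-- ===== CLAIM (what is proved, stated in full; the proofs are below) =====
def Claim_equal_can_complete : Prop := ∀ (initial : String) (word : String), Dom_can_complete initial word → Spec_can_complete initial word (can_complete initial word)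

-- ===== LEMMAS AND PROOFS =====

-- Python str.count on a single-character needle is character count
lemma count_go_single (c : Char) :
    ∀ (s : List Char) (fuel acc : Nat), s.length ≤ fuel →
      PySem.Chars.count.go [c] fuel s acc = acc + s.count c := by
  intro s
  induction s with
  | nil =>
    intro fuel acc _
    cases fuel <;> simp [PySem.Chars.count.go]
  | cons h t ih =>
    intro fuel acc hle
    cases fuel with
    | zero => simp at hle
    | succ f =>
      simp only [List.length_cons] at hle
      by_cases hc : c = h
      · subst hc
        have hpre : [c].isPrefixOf (c :: t) = true := by simp [List.isPrefixOf]
        rw [PySem.Chars.count.go.eq_def]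
        simp only [hpre, if_pos]
        rw [show List.drop [c].length (c :: t) = t from rfl]
        rw [ih f (acc + 1) (by omega)]
        simp
        omega
      · have hpre : [c].isPrefixOf (h :: t) = false := by
          have h1 : [c].isPrefixOf (h :: t) = (c == h && List.isPrefixOf ([] : List Char) t) := rfl
          rw [h1]
          simp [hc]
        rw [PySem.Chars.count.go.eq_def]
        simp [hpre]
        rw [ih f acc (by omega)]
        have hne : (h == c) = false := beq_eq_false_iff_ne.mpr (fun hch => hc hch.symm)
        simp [List.count_cons, hne]

lemma count_single (s : List Char) (c : Char) :
    PySem.Chars.count s [c] = s.count c := by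
  have h := count_go_single c s s.length 0 le_rfl
  simp [PySem.Chars.count, h]

-- [c] is a prefix of t iff t starts with c
lemma singleton_prefix_iff (c : Char) (t : List Char) :
    [c] <+: t ↔ t.head? = some c := by
  cases t with
  | nil => simp
  | cons a t => simp [List.cons_prefix_cons, eq_comm]

-- enumerate cons
lemma enumerate_cons {α : Type} (a : α) (t : List α) (k : Int) :
    PySem.List.enumerate (a :: t) k = (k, a) :: PySem.List.enumerate t (k + 1) := by
  rw [PySem.List.enumerate.eq_def]

-- the occurrence-index list of c in w (proof-side description of B's pos dict entry)
def occL (w : List Char) (c : Char) (k : Int) : List Int :=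
  ((PySem.List.enumerate w k).filter (fun p => p.2 == c)).map Prod.fst

lemma occL_mem (w : List Char) (c : Char) :
    ∀ (k : Int) (x : Int), x ∈ occL w c k ↔ ∃ i : Nat, i < w.length ∧ x = k + i ∧ w[i]? = some c := by
  induction w with
  | nil =>
    intro k x
    simp [occL, PySem.List.enumerate.eq_def]
  | cons a t ih =>
    intro k x
    simp only [occL] at *
    rw [enumerate_cons]
    by_cases hac : a = c
    · subst hac
      rw [List.filter_cons_of_pos (by simp)]
      simp only [List.map_cons]
      constructor
      · intro hx
        rcases List.mem_cons.mp hx with rfl | hx'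
        · exact ⟨0, by simp⟩
        · rcases (ih (k + 1) x).mp hx' with ⟨i, hi, hxe, hg⟩
          exact ⟨i + 1, by simpa using hi, by push_cast; omega, by simpa using hg⟩
      · rintro ⟨i, hi, rfl, hg⟩
        cases i with
        | zero => simp
        | succ j =>
          refine List.mem_cons.mpr (Or.inr ?_)
          refine (ih (k + 1) _).mpr ⟨j, by simpa using hi, by push_cast; omega, by simpa using hg⟩
    · rw [List.filter_cons_of_neg (by simp [hac])]
      rw [ih (k + 1) x]
      constructor
      · rintro ⟨i, hi, rfl, hg⟩
        exact ⟨i + 1, by simpa using hi, by push_cast; omega, by simpa using hg⟩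
      · rintro ⟨i, hi, rfl, hg⟩
        cases i with
        | zero =>
          simp only [List.getElem?_cons_zero, Option.some.injEq] at hg
          exact absurd hg hac
        | succ j =>
          exact ⟨j, by simpa using hi, by push_cast; omega, by simpa using hg⟩

lemma occL_sorted (w : List Char) (c : Char) :
    ∀ (k : Int), (occL w c k).Pairwise (· < ·) := by
  induction w with
  | nil => intro k; simp [occL, PySem.List.enumerate.eq_def]
  | cons a t ih =>
    intro k
    simp only [occL]
    rw [enumerate_cons]
    by_cases hac : a = c
    · subst hac
      rw [List.filter_cons_of_pos (by simp)]
      simp only [List.map_cons]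
      refine List.pairwise_cons.mpr ⟨?_, ih (k + 1)⟩
      intro y hy
      rcases (occL_mem t a (k + 1) y).mp hy with ⟨i, _, rfl, _⟩
      omega
    · rw [List.filter_cons_of_neg (by simp [hac])]
      exact ih (k + 1)

-- B's pos dict entry is the occurrence list
lemma getD_fold_modify_append (l : List (Int × Char)) :
    ∀ (d : PySem.Dict Char (List Int)) (c : Char),
      (l.foldl (fun d p => d.modify p.2 [] (fun v => v ++ [p.1])) d).getD c [] =
        d.getD c [] ++ ((l.filter (fun p => p.2 == c)).map Prod.fst) := by
  induction l with
  | nil => intro d c; simp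
  | cons p l ih =>
    intro d c
    simp only [List.foldl_cons, List.filter_cons]
    rw [ih]
    rw [PySem.Dict.getD_modify]
    by_cases hpc : p.2 = c
    · simp [hpc.symm, List.append_assoc]
    · have h1 : ¬ (c = p.2) := fun h => hpc h.symm
      have h2 : (p.2 == c) = false := by simp [hpc]
      simp [h1, h2]

lemma pyGet?_neg_one (xs : List Int) (h : xs ≠ []) :
    PySem.List.pyGet? xs (-1) = some (xs.getLast h) := by
  have hlen : 0 < xs.length := List.length_pos_iff.mpr h
  simp only [PySem.List.pyGet?, PySem.List.pyIdx?]
  rw [if_neg (by omega), if_pos (by omega)]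
  have hb : ∀ (a : ℕ) (f : ℕ → Option ℤ), Option.bind (some a) f = f a := fun _ _ => rfl
  rw [hb]
  have h1 : ((-(-1 : Int))).toNat = 1 := by norm_num
  rw [h1]
  rw [List.getElem?_eq_getElem (by omega)]
  rw [List.getLast_eq_getElem]

lemma le_getLast {x : Int} (L : List Int) (hs : L.Pairwise (· ≤ ·)) (hx : x ∈ L) (h : L ≠ []) :
    x ≤ L.getLast h := by
  induction L with
  | nil => simp at hx
  | cons a L ihL =>
    rcases List.pairwise_cons.mp hs with ⟨ha, hsL⟩
    by_cases hL : L = []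
    · subst hL
      simp only [List.mem_singleton] at hx
      simp [hx]
    · rw [List.getLast_cons hL]
      rcases List.mem_cons.mp hx with rfl | hx'
      · exact ha _ (List.getLast_mem hL)
      · exact ihL hsL hx' hL

-- binary-search spec: on a sorted list the result splits it at 'start'
lemma pvBsearch_spec (idxs : List Int) (start : Int)
    (hsort : idxs.Pairwise (· ≤ ·)) :
    ∀ (n lo hi : Nat), hi - lo ≤ n → lo ≤ hi → hi ≤ idxs.length →
      (∀ i (hi' : i < idxs.length), i < lo → idxs[i] < start) →
      (∀ i (hi' : i < idxs.length), hi ≤ i → ¬ idxs[i] < start) →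
      pvBsearch idxs start n lo hi ≤ idxs.length ∧
      (∀ i (hi' : i < idxs.length), i < pvBsearch idxs start n lo hi → idxs[i] < start) ∧
      (∀ i (hi' : i < idxs.length), pvBsearch idxs start n lo hi ≤ i → start ≤ idxs[i]) := by
  have hget : ∀ (m : Nat) (hm : m < idxs.length),
      (PySem.List.pyGet? idxs (m : Int)).getD 0 = idxs[m] := by
    intro m hm
    rw [PySem.List.pyGet?_natCast, List.getElem?_eq_getElem hm]
    rfl
  have hmono : ∀ (i j : Nat) (hi' : i < idxs.length) (hj' : j < idxs.length), i ≤ j → idxs[i] ≤ idxs[j] := by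
    intro i j hi' hj' hij
    rcases Nat.lt_or_ge i j with h | h
    · exact (List.pairwise_iff_getElem.mp hsort) i j hi' hj' h
    · have : i = j := by omega
      subst this; exact le_refl _
  intro n
  induction n with
  | zero =>
    intro lo hi hn hlh hhl inv1 inv2
    simp only [pvBsearch]
    refine ⟨by omega, inv1, ?_⟩
    intro i hi' hloi
    have := inv2 i hi' (by omega)
    omega
  | succ n ihn =>
    intro lo hi hn hlh hhl inv1 inv2
    by_cases hlt : lo < hi
    · simp only [pvBsearch]
      rw [if_pos hlt]
      have hmidlt : (lo + hi) / 2 < idxs.length := by omega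
      rw [hget _ hmidlt]
      split_ifs with hv
      · exact ihn ((lo + hi) / 2 + 1) hi (by omega) (by omega) hhl
          (fun i hi' hilt => lt_of_le_of_lt (hmono i _ hi' hmidlt (by omega)) hv) inv2
      · exact ihn lo ((lo + hi) / 2) (by omega) (by omega) (by omega) inv1
          (fun i hi' hge => fun hc => hv (lt_of_le_of_lt (hmono _ i hmidlt hi' hge) hc))
    · simp only [pvBsearch]
      rw [if_neg hlt]
      refine ⟨by omega, inv1, ?_⟩
      intro i hi' hloi
      have := inv2 i hi' (by omega)
      omega

-- the main loop equivalence
lemma loop_eq (ini w : List Char) :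
    ∀ (rest : List Char) (start : Int), 0 ≤ start → start ≤ w.length →
      canAGo ini w rest start =
        canBGo (ini.foldl (fun d ch => d.insert ch (d.getD ch 0 + 1)) PySem.Dict.empty)
               (w.foldl (fun d ch => d.insert ch (d.getD ch 0 + 1)) PySem.Dict.empty)
               ((PySem.List.enumerate w 0).foldl
                  (fun d p => d.modify p.2 [] (fun v => v ++ [p.1])) PySem.Dict.empty)
               rest start := by
  intro rest
  induction rest with
  | nil => intro start _ _; rfl
  | cons c rest ih =>
    intro start h0 hlen
    obtain ⟨st, rfl⟩ : ∃ st : Nat, start = (st : Int) := ⟨start.toNat, by omega⟩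
    have hstlen : st ≤ w.length := by exact_mod_cast hlen
    have hwc : (List.foldl (fun d ch => d.insert ch (d.getD ch 0 + 1)) PySem.Dict.empty w).getD c 0
        = (w.count c : Int) := by
      rw [PySem.Dict.getD_foldl_insert_add_one]; simp
    have hic : (List.foldl (fun d ch => d.insert ch (d.getD ch 0 + 1)) PySem.Dict.empty ini).getD c 0
        = (ini.count c : Int) := by
      rw [PySem.Dict.getD_foldl_insert_add_one]; simp
    have hposd : (List.foldl (fun d p => d.modify p.2 [] (fun v => v ++ [p.1]))
        PySem.Dict.empty (PySem.List.enumerate w 0)).getD c [] = occL w c 0 := by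
      rw [getD_fold_modify_append]
      simp [occL, PySem.Dict.getD_empty]
    have hmemL : ∀ x : Int, x ∈ occL w c 0 ↔ ∃ i : Nat, i < w.length ∧ x = (i : Int) ∧ w[i]? = some c := by
      intro x
      rw [occL_mem]
      simp
    have hsort : (occL w c 0).Pairwise (· ≤ ·) := (occL_sorted w c 0).imp (fun h => le_of_lt h)
    have hslice : PySem.List.slice w (some (st : Int)) none = w.drop st := by
      rw [PySem.List.slice_from w (by omega)]
      simp
    have hmemA : PySem.Chars.isIn [c] (w.drop st) = true ↔ ∃ i : Nat, st ≤ i ∧ w[i]? = some c := by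
      rw [← PySem.Chars.exists_prefix_drop_iff_isIn]
      constructor
      · rintro ⟨j, hj⟩
        rw [singleton_prefix_iff, List.head?_drop, List.getElem?_drop] at hj
        exact ⟨st + j, by omega, hj⟩
      · rintro ⟨i, hsti, hi⟩
        refine ⟨i - st, ?_⟩
        rw [singleton_prefix_iff, List.head?_drop, List.getElem?_drop]
        rw [show st + (i - st) = i by omega]
        exact hi
    have hEx : (∃ i : Nat, st ≤ i ∧ w[i]? = some c) ↔ (∃ x ∈ occL w c 0, (st : Int) ≤ x) := by
      constructor
      · rintro ⟨i, h1, h2⟩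
        have hilen : i < w.length := (List.getElem?_eq_some_iff.mp h2).1
        exact ⟨(i : Int), (hmemL _).mpr ⟨i, hilen, rfl, h2⟩, by exact_mod_cast h1⟩
      · rintro ⟨x, hxL, hxs⟩
        rcases (hmemL x).mp hxL with ⟨i, hilen, rfl, hi⟩
        exact ⟨i, by exact_mod_cast hxs, hi⟩
    simp only [canAGo, canBGo]
    rw [hslice, hwc, hic, hposd, count_single, count_single]
    by_cases hcnt : (w.count c : Int) < (ini.count c : Int)
    · rw [if_pos hcnt]
      have hdec : decide (ini.count c ≤ w.count c) = false := by
        simp only [decide_eq_false_iff_not, not_le]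
        exact_mod_cast hcnt
      rw [hdec]
      simp
    · rw [if_neg hcnt]
      have hdec : decide (ini.count c ≤ w.count c) = true := by
        simp only [decide_eq_true_eq]
        have : ¬ ((w.count c : Int) < (ini.count c : Int)) := hcnt
        exact_mod_cast not_lt.mp this
      rw [hdec]
      by_cases hex : ∃ x ∈ occL w c 0, (st : Int) ≤ x
      · rcases hex with ⟨x0, hx0L, hx0s⟩
        have hne : occL w c 0 ≠ [] := by
          intro hnil; rw [hnil] at hx0L; simp at hx0L
        have hisIn : PySem.Chars.isIn [c] (w.drop st) = true :=
          hmemA.mpr (hEx.mpr ⟨x0, hx0L, hx0s⟩)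
        rw [hisIn]
        have hie : (occL w c 0).isEmpty = false := by
          simp [hne]
        rw [hie]
        rw [pyGet?_neg_one _ hne]
        have hlastmem := le_getLast (occL w c 0) hsort hx0L hne
        have hlast : ¬ ((occL w c 0).getLast hne < (st : Int)) := by omega
        simp only [Bool.and_self, if_true, Bool.false_eq_true, if_false, Option.getD_some,
          if_neg hlast]
        -- new starts are equal
        obtain ⟨hrle, hr1, hr2⟩ := pvBsearch_spec (occL w c 0) (st : Int) hsort (occL w c 0).length
          0 (occL w c 0).length (by omega) (Nat.zero_le _) (le_refl _)
          (fun i hi' h => absurd h (Nat.not_lt_zero i)) (fun i hi' hge => by omega)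
        have hrlt : pvBsearch (occL w c 0) (st : Int) (occL w c 0).length 0 (occL w c 0).length < (occL w c 0).length := by
          by_contra hge
          rcases List.mem_iff_getElem.mp hx0L with ⟨t0, ht0, rfl⟩
          have := hr1 t0 ht0 (by omega)
          omega
        have hLr : (PySem.List.pyGet? (occL w c 0)
            ((pvBsearch (occL w c 0) (st : Int) (occL w c 0).length 0 (occL w c 0).length : Nat) : Int)).getD 0
            = (occL w c 0)[pvBsearch (occL w c 0) (st : Int) (occL w c 0).length 0 (occL w c 0).length] := by
          rw [PySem.List.pyGet?_natCast, List.getElem?_eq_getElem hrlt]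
          rfl
        have hLrmem : (occL w c 0)[pvBsearch (occL w c 0) (st : Int) (occL w c 0).length 0 (occL w c 0).length] ∈ occL w c 0 :=
          List.getElem_mem hrlt
        rcases (hmemL _).mp hLrmem with ⟨iB, hiBlen, hiBeq, hiBg⟩
        have hstiB : st ≤ iB := by
          have := hr2 _ hrlt (le_refl _)
          rw [hiBeq] at this
          exact_mod_cast this
        have hff : PySem.Chars.findFrom w [c] (st : Int) ≠ -1 := by
          intro hq
          rw [PySem.Chars.findFrom_natCast_eq_neg_one_iff w [c] st hstlen] at hq
          exact hq ((PySem.Chars.isIn_iff_infix _ _).mp hisIn)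
        obtain ⟨hge, hpre, hmin⟩ := PySem.Chars.findFrom_natCast_spec w [c] st hstlen hff
        have hgA : w[(PySem.Chars.findFrom w [c] (st : Int)).toNat]? = some c := by
          rw [singleton_prefix_iff, List.head?_drop] at hpre
          exact hpre
        have hAlen : (PySem.Chars.findFrom w [c] (st : Int)).toNat < w.length :=
          (List.getElem?_eq_some_iff.mp hgA).1
        have hiAleiB : (PySem.Chars.findFrom w [c] (st : Int)).toNat ≤ iB := by
          by_contra hlt
          push Not at hlt
          refine hmin iB hstiB hlt ?_
          rw [singleton_prefix_iff, List.head?_drop]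
          exact hiBg
        have hiBleiA : iB ≤ (PySem.Chars.findFrom w [c] (st : Int)).toNat := by
          have hmemA' : (((PySem.Chars.findFrom w [c] (st : Int)).toNat : Int)) ∈ occL w c 0 :=
            (hmemL _).mpr ⟨_, hAlen, rfl, hgA⟩
          rcases List.mem_iff_getElem.mp hmemA' with ⟨t0, ht0, het⟩
          have htr : pvBsearch (occL w c 0) (st : Int) (occL w c 0).length 0 (occL w c 0).length ≤ t0 := by
            by_contra hlt
            push Not at hlt
            have h1 := hr1 t0 ht0 hlt
            rw [het] at h1
            omega
          have hmono := List.pairwise_iff_getElem.mp hsort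
          have hle2 : (occL w c 0)[pvBsearch (occL w c 0) (st : Int) (occL w c 0).length 0 (occL w c 0).length] ≤
              (occL w c 0)[t0] := by
            rcases Nat.lt_or_ge (pvBsearch (occL w c 0) (st : Int) (occL w c 0).length 0 (occL w c 0).length) t0 with hlt | hge2
            · exact hmono _ _ hrlt ht0 hlt
            · have hEq : pvBsearch (occL w c 0) (st : Int) (occL w c 0).length 0 (occL w c 0).length = t0 := by omega
              have e1 : some ((occL w c 0)[pvBsearch (occL w c 0) (st : Int) (occL w c 0).length 0 (occL w c 0).length]'hrlt)
                  = some ((occL w c 0)[t0]'ht0) := by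
                rw [← List.getElem?_eq_getElem hrlt, ← List.getElem?_eq_getElem ht0, hEq]
              exact le_of_eq (Option.some.inj e1)
          rw [het, hiBeq] at hle2
          exact_mod_cast hle2
        have hiAB : PySem.Chars.findFrom w [c] (st : Int) = (iB : Int) := by
          have h1 : (PySem.Chars.findFrom w [c] (st : Int)).toNat = iB :=
            le_antisymm hiAleiB hiBleiA
          omega
        rw [hLr, hiBeq, hiAB]
        exact ih (iB : Int) (by positivity) (by exact_mod_cast le_of_lt hiBlen)
      · have hnoi : ¬ ∃ i : Nat, st ≤ i ∧ w[i]? = some c := fun h => hex (hEx.mp h)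
        have hisIn : PySem.Chars.isIn [c] (w.drop st) = false := by
          rcases Bool.eq_false_or_eq_true (PySem.Chars.isIn [c] (w.drop st)) with hT | hF
          · exact absurd (hmemA.mp hT) hnoi
          · exact hF
        rw [hisIn]
        by_cases hne : occL w c 0 = []
        · rw [hne]
          simp
        · have hie : (occL w c 0).isEmpty = false := by
            simp [hne]
          rw [hie]
          rw [pyGet?_neg_one _ hne]
          have hlast : (occL w c 0).getLast hne < (st : Int) := by
            by_contra hge
            push Not at hge
            exact hex ⟨_, List.getLast_mem hne, hge⟩
          simp only [Bool.false_and, Bool.false_eq_true, if_false, Option.getD_some, if_pos hlast]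

-- ===== VERDICT (by name: the statement is the Claim_ definition above) =====
theorem can_complete_spec : Claim_equal_can_complete := by
  intro initial word _
  unfold Spec_can_complete can_complete can_complete_alt
  exact loop_eq initial.toList word.toList initial.toList 0 (by omega) (by positivity)
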